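-- pv_equiv track=rewrite | github.com/AbdulHadi117/LeetCodePractice | August/Day9.py | numMagicSquaresInside
-- ===== SOURCE A (Python) =====
-- def numMagicSquaresInside(grid):
--     count = 0  # Initialize counter for the number of magic squares
--     rows = len(grid)  # Get the number of rows in the grid
--     cols = len(grid[0])  # Get the number of columns in the grid
--
--     # Iterate over each possible 3x3 subgrid in the grid
--     for row in range(rows - 2):
--         for col in range(cols - 2):
--             # Check if the current 3x3 subgrid is a magic square
--             if isMagicSquare(grid, row, col):
--                 count += 1  # Increment the count if it's a magic square
--
--     return count  # Return the total number of magic squares found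
--
-- def isMagicSquare(grid, row, col):
--     # Track seen numbers to ensure all are unique and within 1-9
--     alreadyseenElement = [False] * 10
--     # Check each cell in the 3x3 subgrid
--     for i in range(3):
--         for j in range(3):
--             num = grid[row + i][col + j]  # Get the current number
--             # If the number is not between 1 and 9 or has been seen before, return False
--             if num < 1 or num > 9:
--                 return False
--             if alreadyseenElement[num]:
--                 return False
--             alreadyseenElement[num] = True  # Mark the number as seen
--
--     # Calculate the sums of the two diagonals
--     diagonal1 = grid[row][col] + grid[row + 1][col + 1] + grid[row + 2][col + 2]
--     diagonal2 = grid[row + 2][col] + grid[row + 1][col + 1] + grid[row][col + 2]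
--
--     # If the diagonals don't have the same sum, it's not a magic square
--     if diagonal1 != diagonal2:
--         return False
--
--     # Calculate the sums of each row in the subgrid
--     row1 = grid[row][col] + grid[row][col + 1] + grid[row][col + 2]
--     row2 = grid[row + 1][col] + grid[row + 1][col + 1] + grid[row + 1][col + 2]
--     row3 = grid[row + 2][col] + grid[row + 2][col + 1] + grid[row + 2][col + 2]
--
--     # If any row sum is not equal to the diagonal sum, return False
--     if not (row1 == row2 == row3 == diagonal1):
--         return False
--
--     # Calculate the sums of each column in the subgrid
--     col1 = grid[row][col] + grid[row + 1][col] + grid[row + 2][col]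
--     col2 = grid[row][col + 1] + grid[row + 1][col + 1] + grid[row + 2][col + 1]
--     col3 = grid[row][col + 2] + grid[row + 1][col + 2] + grid[row + 2][col + 2]
--
--     # If any column sum is not equal to the diagonal sum, return False
--     if not (col1 == col2 == col3 == diagonal1):
--         return False
--
--     return True  # If all checks pass, the subgrid is a magic square
-- ===== SOURCE B (Python) =====
-- # The eight 3x3 magic squares (row-major), i.e. all rotations/reflections of the classic one.
-- MAGIC = {
--     (2, 7, 6, 9, 5, 1, 4, 3, 8), (2, 9, 4, 7, 5, 3, 6, 1, 8),
--     (4, 3, 8, 9, 5, 1, 2, 7, 6), (4, 9, 2, 3, 5, 7, 8, 1, 6),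
--     (6, 1, 8, 7, 5, 3, 2, 9, 4), (6, 7, 2, 1, 5, 9, 8, 3, 4),
--     (8, 1, 6, 3, 5, 7, 4, 9, 2), (8, 3, 4, 1, 5, 9, 6, 7, 2),
-- }
--
-- def numMagicSquaresInside(grid):
--     rows, cols = len(grid), len(grid[0])
--     count = 0
--     for r in range(rows - 2):
--         for c in range(cols - 2):
--             block = (grid[r][c], grid[r][c + 1], grid[r][c + 2],
--                      grid[r + 1][c], grid[r + 1][c + 1], grid[r + 1][c + 2],
--                      grid[r + 2][c], grid[r + 2][c + 1], grid[r + 2][c + 2])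
--             if block in MAGIC:
--                 count += 1
--     return count
-- ===== Notes on version B (the rewrite author's own statement) =====
-- stated objective: simpler
-- what changed: Per 3x3 block, B replaces A's range/uniqueness scan with a seen-array plus seven row/column/diagonal sum checks by a single membership test of the nine cells against the precomputed set of the eight 3x3 magic squares.
-- outside the precondition, e.g. on numMagicSquaresInside([[0, 1, 2], [1, 2, 3], [2, 3]]): A returns 0, B raises IndexError
import Mathlib
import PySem

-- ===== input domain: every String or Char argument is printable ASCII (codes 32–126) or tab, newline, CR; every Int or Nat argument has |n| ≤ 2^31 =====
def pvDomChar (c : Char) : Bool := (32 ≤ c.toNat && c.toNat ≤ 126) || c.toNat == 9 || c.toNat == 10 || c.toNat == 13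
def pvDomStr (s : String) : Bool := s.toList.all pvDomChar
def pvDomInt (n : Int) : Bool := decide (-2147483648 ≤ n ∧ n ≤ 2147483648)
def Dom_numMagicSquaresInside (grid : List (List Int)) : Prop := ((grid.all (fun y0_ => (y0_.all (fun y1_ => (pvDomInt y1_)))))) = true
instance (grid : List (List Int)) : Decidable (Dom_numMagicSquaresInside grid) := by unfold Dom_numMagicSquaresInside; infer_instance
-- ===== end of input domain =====

-- B replaces A's seen-array scan plus seven sum checks by one membership test of the
-- 3x3 block against the eight magic squares; objective: simpler.

-- ===== PORT A =====

-- grid[r][c]; the .getD defaults are never hit on Pre_ (nonempty rectangular grid,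
-- indices generated by the loops are in range), where this is exact Python indexing.
def pvGet (grid : List (List Int)) (r c : Int) : Int :=
  (PySem.List.pyGet? ((PySem.List.pyGet? grid r).getD []) c).getD 0

-- alreadyseenElement[num] (num is 0..9 at every use, so this is exact)
def lkSeen (seen : List Bool) (v : Int) : Bool :=
  (PySem.List.pyGet? seen v).getD false

-- the double loop 'for i in range(3): for j in range(3)' of isMagicSquare, walking the
-- nine cells in row-major order with the seen array as state
def pvGate : List Int → List Bool → Bool
  | [], _ => true
  | v :: vs, seen =>
    if v < 1 ∨ 9 < v then false
    else if lkSeen seen v then false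
    else pvGate vs (seen.set v.toNat true)

-- isMagicSquare's checks on the nine cell values (row-major)
def isMagicVals (a b c d e f g h i : Int) : Bool :=
  if pvGate [a, b, c, d, e, f, g, h, i] (List.replicate 10 false) = false then false
  else if a + e + i ≠ g + e + c then false
  else if ¬(a + b + c = d + e + f ∧ d + e + f = g + h + i ∧ g + h + i = a + e + i) then false
  else if ¬(a + d + g = b + e + h ∧ b + e + h = c + f + i ∧ c + f + i = a + e + i) then false
  else true

def isMagicSquare (grid : List (List Int)) (row col : Int) : Bool :=
  isMagicVals (pvGet grid row col) (pvGet grid row (col + 1)) (pvGet grid row (col + 2))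
    (pvGet grid (row + 1) col) (pvGet grid (row + 1) (col + 1)) (pvGet grid (row + 1) (col + 2))
    (pvGet grid (row + 2) col) (pvGet grid (row + 2) (col + 1)) (pvGet grid (row + 2) (col + 2))

def numMagicSquaresInside (grid : List (List Int)) : Int :=
  let rows : Int := grid.length
  let cols : Int := ((PySem.List.pyGet? grid 0).getD []).length
  (PySem.List.pyRange 0 (rows - 2) 1).foldl (fun count row =>
    (PySem.List.pyRange 0 (cols - 2) 1).foldl (fun count col =>
      if isMagicSquare grid row col then count + 1 else count) count) 0

-- ===== PORT B =====

-- the set MAGIC of Source B (a Python set of tuples → list of distinct 9-tuples)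
def magicList : List (Int × Int × Int × Int × Int × Int × Int × Int × Int) :=
  [(2, 7, 6, 9, 5, 1, 4, 3, 8), (2, 9, 4, 7, 5, 3, 6, 1, 8),
   (4, 3, 8, 9, 5, 1, 2, 7, 6), (4, 9, 2, 3, 5, 7, 8, 1, 6),
   (6, 1, 8, 7, 5, 3, 2, 9, 4), (6, 7, 2, 1, 5, 9, 8, 3, 4),
   (8, 1, 6, 3, 5, 7, 4, 9, 2), (8, 3, 4, 1, 5, 9, 6, 7, 2)]

-- 'block in MAGIC'
def isMagicB (grid : List (List Int)) (r c : Int) : Bool :=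
  decide ((pvGet grid r c, pvGet grid r (c + 1), pvGet grid r (c + 2),
    pvGet grid (r + 1) c, pvGet grid (r + 1) (c + 1), pvGet grid (r + 1) (c + 2),
    pvGet grid (r + 2) c, pvGet grid (r + 2) (c + 1), pvGet grid (r + 2) (c + 2)) ∈ magicList)

def numMagicSquaresInside_alt (grid : List (List Int)) : Int :=
  let rows : Int := grid.length
  let cols : Int := ((PySem.List.pyGet? grid 0).getD []).length
  (PySem.List.pyRange 0 (rows - 2) 1).foldl (fun count r =>
    (PySem.List.pyRange 0 (cols - 2) 1).foldl (fun count c =>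
      if isMagicB grid r c then count + 1 else count) count) 0

-- ===== PRECONDITION & SPEC =====
-- Pre_ excludes the empty grid (A raises IndexError on grid[0]) and ragged grids that
-- are large enough to be scanned (≥ 3 rows and ≥ 3 leading columns): there A raises
-- IndexError whenever its scan reaches a missing cell, and whether it raises depends on
-- the cell values, so that whole ragged class is excluded (on some of them an early
-- out-of-range value stops the scan first and A still returns 0).
def Pre_numMagicSquaresInside (grid : List (List Int)) : Prop :=
  grid ≠ [] ∧
    (grid.length < 3 ∨ (grid.headD []).length < 3 ∨ ∀ r ∈ grid, r.length = (grid.headD []).length)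
instance (grid : List (List Int)) : Decidable (Pre_numMagicSquaresInside grid) := by
  unfold Pre_numMagicSquaresInside; infer_instance

def pvWitness_numMagicSquaresInside : List (List Int) :=
  [[4, 3, 8, 4], [9, 5, 1, 9], [2, 7, 6, 2]]

def Spec_numMagicSquaresInside (grid : List (List Int)) (out : Int) : Prop := out = numMagicSquaresInside_alt grid
instance (grid : List (List Int)) (out : Int) : Decidable (Spec_numMagicSquaresInside grid out) := by unfold Spec_numMagicSquaresInside; infer_instance

-- ===== CLAIM (what is proved, stated in full; the proofs are below) =====
def Claim_equal_numMagicSquaresInside : Prop := ∀ (grid : List (List Int)), Dom_numMagicSquaresInside grid → Pre_numMagicSquaresInside grid → Spec_numMagicSquaresInside grid (numMagicSquaresInside grid)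

-- ===== LEMMAS AND PROOFS =====


lemma lk_set (seen : List Bool) (v w : Int) (hlen : seen.length = 10)
    (hv1 : 1 ≤ v) (hv9 : v ≤ 9) (hw1 : 1 ≤ w) (hw9 : w ≤ 9) :
    lkSeen (seen.set v.toNat true) w = if w = v then true else lkSeen seen w := by
  unfold lkSeen
  rw [PySem.List.pyGet?_of_nonneg (seen.set v.toNat true) (show (0:Int) ≤ w by omega),
    PySem.List.pyGet?_of_nonneg seen (show (0:Int) ≤ w by omega)]
  rw [List.getElem?_set]
  by_cases hwv : w = v
  · subst hwv
    rw [if_pos rfl, if_pos (show w.toNat < seen.length by omega)]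
    simp
  · have : v.toNat ≠ w.toNat := by omega
    simp [this, hwv]

lemma gate_iff (vs : List Int) (seen : List Bool) (hlen : seen.length = 10) :
    pvGate vs seen = true ↔
      ((∀ v ∈ vs, 1 ≤ v ∧ v ≤ 9 ∧ lkSeen seen v = false) ∧ vs.Nodup) := by
  induction vs generalizing seen with
  | nil => simp [pvGate]
  | cons v vs ih =>
    unfold pvGate
    by_cases h1 : v < 1 ∨ 9 < v
    · simp only [h1, if_true]
      constructor
      · intro h; exact absurd h (by simp)
      · rintro ⟨hall, -⟩
        have := hall v (List.mem_cons_self)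
        omega
    · have hv : 1 ≤ v ∧ v ≤ 9 := by omega
      simp only [if_neg h1]
      by_cases h2 : lkSeen seen v = true
      · simp only [h2, if_true]
        constructor
        · intro h; exact absurd h (by simp)
        · rintro ⟨hall, -⟩
          have := (hall v (List.mem_cons_self)).2.2
          simp [this] at h2
      · have hlk : lkSeen seen v = false := by
          cases h : lkSeen seen v
          · rfl
          · exact absurd h h2
        simp only [h2, if_false, Bool.false_eq_true]
        rw [ih (seen.set v.toNat true) (by simp [hlen])]
        constructor
        · rintro ⟨hall, hnd⟩
          have hvnotin : v ∉ vs := by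
            intro hmem
            have := (hall v hmem).2.2
            rw [lk_set seen v v hlen hv.1 hv.2 hv.1 hv.2] at this
            simp at this
          refine ⟨?_, List.nodup_cons.mpr ⟨hvnotin, hnd⟩⟩
          intro w hw
          rcases List.mem_cons.mp hw with rfl | hw'
          · exact ⟨hv.1, hv.2, hlk⟩
          · obtain ⟨hw1, hw9, hl⟩ := hall w hw'
            rw [lk_set seen v w hlen hv.1 hv.2 hw1 hw9] at hl
            refine ⟨hw1, hw9, ?_⟩
            by_cases hwv : w = v
            · simp [hwv] at hl
            · simpa [hwv] using hl
        · rintro ⟨hall, hnd⟩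
          obtain ⟨hvnotin, hnd'⟩ := List.nodup_cons.mp hnd
          refine ⟨?_, hnd'⟩
          intro w hw
          obtain ⟨hw1, hw9, hl⟩ := hall w (List.mem_cons_of_mem _ hw)
          refine ⟨hw1, hw9, ?_⟩
          rw [lk_set seen v w hlen hv.1 hv.2 hw1 hw9]
          have hwv : w ≠ v := by rintro rfl; exact hvnotin hw
          simpa [hwv] using hl

lemma vals_true_iff (a b c d e f g h i : Int) :
    isMagicVals a b c d e f g h i = true ↔
      (pvGate [a, b, c, d, e, f, g, h, i] (List.replicate 10 false) = true ∧
        a + e + i = g + e + c ∧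
        (a + b + c = d + e + f ∧ d + e + f = g + h + i ∧ g + h + i = a + e + i) ∧
        (a + d + g = b + e + h ∧ b + e + h = c + f + i ∧ c + f + i = a + e + i)) := by
  unfold isMagicVals
  split_ifs with h1 h2 h3 h4 <;> simp_all

lemma sum45 (l : List Int) (h9 : l.length = 9) (hnd : l.Nodup)
    (hb : ∀ x ∈ l, 1 ≤ x ∧ x ≤ 9) : l.sum = 45 := by
  have hsub : l.toFinset ⊆ Finset.Icc (1 : ℤ) 9 := by
    intro x hx
    rw [List.mem_toFinset] at hx
    have := hb x hx
    rw [Finset.mem_Icc]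
    omega
  have hcard : (Finset.Icc (1 : ℤ) 9).card ≤ l.toFinset.card := by
    rw [List.toFinset_card_of_nodup hnd, h9]
    decide
  have heq : l.toFinset = Finset.Icc (1 : ℤ) 9 :=
    Finset.eq_of_subset_of_card_le hsub hcard
  have := List.sum_toFinset (M := ℤ) id hnd
  rw [heq] at this
  simpa using this.symm

lemma forward (a b c d e f g h i : Int)
    (hnd : [a, b, c, d, e, f, g, h, i].Nodup)
    (hb : ∀ v ∈ [a, b, c, d, e, f, g, h, i], 1 ≤ v ∧ v ≤ 9)
    (hdg : a + e + i = g + e + c)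
    (hr : a + b + c = d + e + f ∧ d + e + f = g + h + i ∧ g + h + i = a + e + i)
    (hc : a + d + g = b + e + h ∧ b + e + h = c + f + i ∧ c + f + i = a + e + i) :
    (a, b, c, d, e, f, g, h, i) ∈ magicList := by
  have h45 := sum45 [a, b, c, d, e, f, g, h, i] (by simp) hnd hb
  simp only [List.sum_cons, List.sum_nil, add_zero] at h45
  have hba := hb a (by simp); have hbb := hb b (by simp); have hbc := hb c (by simp)
  have hbd := hb d (by simp); have hbe := hb e (by simp); have hbf := hb f (by simp)
  have hbg := hb g (by simp); have hbh := hb h (by simp); have hbi := hb i (by simp)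
  obtain ⟨hr1, hr2, hr3⟩ := hr
  obtain ⟨hc1, hc2, hc3⟩ := hc
  have he : e = 5 := by omega
  have hB : b = 15 - a - c := by omega
  have hD : d = 5 - a + c := by omega
  have hF : f = 5 + a - c := by omega
  have hG : g = 10 - c := by omega
  have hH : h = a + c - 5 := by omega
  have hI : i = 10 - a := by omega
  subst he hB hD hF hG hH hI
  have ha1 : 1 ≤ a := hba.1
  have ha9 : a ≤ 9 := hba.2
  have hc1' : 1 ≤ c := hbc.1
  have hc9' : c ≤ 9 := hbc.2
  interval_cases a <;> interval_cases c <;>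
    first
      | decide
      | (exact absurd hnd (by decide))
      | (exfalso; omega)

lemma backward (a b c d e f g h i : Int)
    (hm : (a, b, c, d, e, f, g, h, i) ∈ magicList) :
    isMagicVals a b c d e f g h i = true := by
  simp only [magicList, List.mem_cons, List.not_mem_nil, or_false] at hm
  rcases hm with hm | hm | hm | hm | hm | hm | hm | hm <;>
    · simp only [Prod.mk.injEq] at hm
      obtain ⟨rfl, rfl, rfl, rfl, rfl, rfl, rfl, rfl, rfl⟩ := hm
      decide

lemma vals_eq (a b c d e f g h i : Int) :
    isMagicVals a b c d e f g h i = decide ((a, b, c, d, e, f, g, h, i) ∈ magicList) := by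
  by_cases hm : (a, b, c, d, e, f, g, h, i) ∈ magicList
  · rw [backward a b c d e f g h i hm]
    simp [hm]
  · have hA : ¬ isMagicVals a b c d e f g h i = true := by
      intro ht
      obtain ⟨hg, hdg, hr, hc⟩ := (vals_true_iff a b c d e f g h i).mp ht
      obtain ⟨hall, hnd⟩ := (gate_iff _ _ (by simp)).mp hg
      exact hm (forward a b c d e f g h i hnd
        (fun v hv => ⟨(hall v hv).1, (hall v hv).2.1⟩) hdg hr hc)
    simp only [Bool.not_eq_true] at hA
    rw [hA]
    simp [hm]

lemma isMagic_eq (grid : List (List Int)) (r c : Int) :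
    isMagicSquare grid r c = isMagicB grid r c := by
  unfold isMagicSquare isMagicB
  exact vals_eq _ _ _ _ _ _ _ _ _

-- ===== VERDICT (by name: the statement is the Claim_ definition above) =====
theorem numMagicSquaresInside_spec : Claim_equal_numMagicSquaresInside := by
  intro grid _ _
  unfold Spec_numMagicSquaresInside numMagicSquaresInside numMagicSquaresInside_alt
  simp only [isMagic_eq]
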